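-- pv_equiv track=rewrite | github.com/zgjimsejdiu1/Projekti-2-Kriptografi | diagonal.py | diagonal_encrypt
-- ===== SOURCE A (Python) =====
-- def clean_text(text):
--     return "".join(c.upper() for c in text if c.isalpha())
--
-- def diagonal_encrypt(text):
--     text = clean_text(text)
--     length = len(text)
--
--     size = 1
--     while size * size < length:
--         size += 1
--
--
--     grid = [['X' for _ in range(size)] for _ in range(size)]
--
--     index = 0
--
--
--     for i in range(size):
--         for j in range(size):
--             if index < length:
--                 grid[i][j] = text[index]
--                 index += 1
--
--
--     result = ""
--
--     for k in range(2 * size):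
--         for i in range(size):
--             j = k - i
--             if 0 <= j < size:
--                 result += grid[i][j]
--
--     return result
-- ===== SOURCE B (Python) =====
-- def clean_text(text):
--     return "".join(c.upper() for c in text if c.isalpha())
--
-- def diagonal_encrypt(text):
--     text = clean_text(text)
--     length = len(text)
--
--     size = 1
--     while size * size < length:
--         size += 1
--
--     # one anti-diagonal bucket per index i+j; single row-major pass, no grid
--     buckets = [[] for _ in range(2 * size - 1)]
--     for m in range(size * size):
--         ch = text[m] if m < length else 'X'
--         buckets[m // size + m % size].append(ch)
--
--     return "".join("".join(b) for b in buckets)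
-- ===== Notes on version B (the rewrite author's own statement) =====
-- stated objective: simpler
-- what changed: Replaces the 2D grid fill plus nested anti-diagonal scan with a single row-major pass that drops each padded character into one of 2*size-1 diagonal buckets, then joins the buckets; no grid is ever built or read.
import Mathlib
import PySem

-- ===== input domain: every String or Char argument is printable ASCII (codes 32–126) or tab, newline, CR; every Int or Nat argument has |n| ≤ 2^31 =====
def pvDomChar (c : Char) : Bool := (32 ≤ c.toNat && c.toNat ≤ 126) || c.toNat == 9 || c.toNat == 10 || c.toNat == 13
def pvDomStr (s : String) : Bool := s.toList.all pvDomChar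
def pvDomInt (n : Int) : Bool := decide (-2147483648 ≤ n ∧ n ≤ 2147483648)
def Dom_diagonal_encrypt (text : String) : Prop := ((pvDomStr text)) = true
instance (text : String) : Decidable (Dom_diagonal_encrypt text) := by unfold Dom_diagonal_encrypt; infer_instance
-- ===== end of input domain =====

-- B replaces A's grid fill + nested anti-diagonal scan by a single row-major pass into
-- per-diagonal buckets that are then joined (simpler: no 2D grid is built or read).

-- ===== PORT A =====
-- helper clean_text: "".join(c.upper() for c in text if c.isalpha())
def pvClean (text : String) : List Char :=
  (text.toList.filter (fun c => PySem.Chars.isalpha c)).map (fun c => PySem.Chars.upperChar c)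

-- termination helper for the 'while size*size < length' loop
theorem pvSizeDec {n size : Nat} (h : size * size < n) : n - (size + 1) < n - size := by
  rcases Nat.eq_zero_or_pos size with hz | hp
  · subst hz; simp at h; omega
  · have := Nat.le_mul_of_pos_left size hp; omega

-- size = 1; while size*size < length: size += 1
def pvSize (n size : Nat) : Nat :=
  if h : size * size < n then pvSize n (size + 1) else size
termination_by n - size
decreasing_by exact pvSizeDec h

def diagonal_encrypt (text : String) : String :=
  let t := pvClean text
  let length := t.length
  let size := pvSize length 1
  let grid0 : List (List Char) := List.replicate size (List.replicate size 'X')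
  let fill := (List.range size).foldl (fun (st : List (List Char) × Nat) i =>
      (List.range size).foldl (fun (st : List (List Char) × Nat) j =>
        if st.2 < length then
          (st.1.set i (((st.1.getD i []).set j (t.getD st.2 'X'))), st.2 + 1)
        else st) st) (grid0, 0)
  let grid := fill.1
  let result := (List.range (2 * size)).foldl (fun (acc : List Char) (k : Nat) =>
      (List.range size).foldl (fun (acc : List Char) (i : Nat) =>
        let j : Int := (k : Int) - (i : Int)
        if 0 ≤ j ∧ j < (size : Int) then acc ++ [(grid.getD i []).getD j.toNat 'X']
        else acc) acc) []
  String.ofList result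

-- ===== PORT B =====
def diagonal_encrypt_alt (text : String) : String :=
  let t := pvClean text
  let length := t.length
  let size := pvSize length 1
  let buckets := (List.range (size * size)).foldl (fun (bs : List (List Char)) m =>
      let ch := if m < length then t.getD m 'X' else 'X'
      let d := m / size + m % size
      bs.set d ((bs.getD d []) ++ [ch])) (List.replicate (2 * size - 1) [])
  String.ofList buckets.flatten

-- ===== PRECONDITION & SPEC =====
def Spec_diagonal_encrypt (text : String) (out : String) : Prop := out = diagonal_encrypt_alt text
instance (text : String) (out : String) : Decidable (Spec_diagonal_encrypt text out) := by unfold Spec_diagonal_encrypt; infer_instance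

-- ===== CLAIM (what is proved, stated in full; the proofs are below) =====
def Claim_equal_diagonal_encrypt : Prop := ∀ (text : String), Dom_diagonal_encrypt text → Spec_diagonal_encrypt text (diagonal_encrypt text)

-- ===== LEMMAS AND PROOFS =====

-- the padded character at row-major position m
def gVal (t : List Char) (n m : Nat) : Char := if m < n then t.getD m 'X' else 'X'

-- A's grid after the first N cells (row-major) have been processed
def cellG (t : List Char) (n s N : Nat) : List (List Char) :=
  (List.range s).map (fun r => (List.range s).map (fun c =>
    if r * s + c < N ∧ r * s + c < n then t.getD (r * s + c) 'X' else 'X'))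

-- B's bucket d after the first N positions have been processed
def bktG (t : List Char) (n s N d : Nat) : List Char :=
  ((List.range N).filter (fun m => decide (m / s + m % s = d))).map (fun m => gVal t n m)

theorem pvSize_ge (n size : Nat) : size ≤ pvSize n size := by
  fun_induction pvSize with
  | case1 size h ih => omega
  | case2 size h => omega

theorem pvSize_sq (n size : Nat) : n ≤ pvSize n size * pvSize n size := by
  fun_induction pvSize with
  | case1 size h ih => exact ih
  | case2 size h => omega

theorem set_map_range {α : Type} (c d : Nat) (F : Nat → α) (x : α) :
    ((List.range c).map F).set d x = (List.range c).map (fun i => if i = d then x else F i) := by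
  apply List.ext_getElem
  · simp
  · intro i h1 h2
    by_cases h : i = d
    · simp [h]
    · simp [List.getElem_set, h]
      exact fun hdi => absurd hdi.symm h

theorem map_filter_eq_flatMap {α β : Type} (l : List α) (p : α → Bool) (f : α → β) :
    (l.filter p).map f = l.flatMap (fun a => if p a then [f a] else []) := by
  induction l with
  | nil => rfl
  | cons a l ih => by_cases h : p a <;> simp [h, ih]

theorem range_mul (a b : Nat) :
    List.range (a * b) = (List.range a).flatMap (fun i => (List.range b).map (fun j => i * b + j)) := by
  induction a with
  | zero => simp
  | succ a ih =>
      rw [Nat.succ_mul, List.range_add, ih, List.range_succ, List.flatMap_append]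
      simp [Nat.add_comm]

theorem filter_range_eq (b i k : Nat) :
    (List.range b).filter (fun j => decide (i + j = k)) =
      if i ≤ k ∧ k - i < b then [k - i] else [] := by
  induction b with
  | zero => simp
  | succ b ih =>
      rw [List.range_succ, List.filter_append, ih]
      by_cases h2 : i + b = k
      · have h1 : ¬(i ≤ k ∧ k - i < b) := by omega
        have hb : i ≤ k ∧ k - i < b + 1 := by omega
        have hkb : k - i = b := by omega
        simp [h2, hb, hkb]
      · by_cases h1 : i ≤ k ∧ k - i < b
        · have hb : i ≤ k ∧ k - i < b + 1 := by omega
          simp [h2, h1, hb]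
        · have hb : ¬(i ≤ k ∧ k - i < b + 1) := by omega
          simp [h2, h1]
          omega

theorem cell_inj {s r c i j : Nat} (hc : c < s) (hj : j < s)
    (h : r * s + c = i * s + j) : r = i ∧ c = j := by
  have hs : 0 < s := by omega
  have h1 : (r * s + c) / s = r := by rw [Nat.mul_comm r s, Nat.mul_add_div hs, Nat.div_eq_of_lt hc]; omega
  have h2 : (i * s + j) / s = i := by rw [Nat.mul_comm i s, Nat.mul_add_div hs, Nat.div_eq_of_lt hj]; omega
  have hr : r = i := by rw [← h1, ← h2, h]
  constructor
  · exact hr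
  · subst hr; omega

theorem getD_cellG (t : List Char) (n s N i : Nat) (hi : i < s) :
    (cellG t n s N).getD i [] =
      (List.range s).map (fun c => if i * s + c < N ∧ i * s + c < n then t.getD (i * s + c) 'X' else 'X') := by
  unfold cellG
  rw [List.getD_eq_getElem?_getD]
  simp [hi]




theorem cell_lt {s r c : Nat} (hr : r < s) (hc : c < s) : r * s + c < s * s := by
  have h1 : (r + 1) * s ≤ s * s := Nat.mul_le_mul_right s (by omega)
  have h2 : (r + 1) * s = r * s + s := by ring
  omega

theorem cellG_zero (t : List Char) (n s : Nat) :
    cellG t n s 0 = List.replicate s (List.replicate s 'X') := by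
  unfold cellG
  simp

-- one inner-loop step of A's fill, at cell (i, j)
theorem fill_step (t : List Char) (n s i j : Nat) (hi : i < s) (hj : j < s) :
    (fun (st : List (List Char) × Nat) j' =>
        if st.2 < n then (st.1.set i (((st.1.getD i []).set j' (t.getD st.2 'X'))), st.2 + 1) else st)
      (cellG t n s (i * s + j), min (i * s + j) n) j
    = (cellG t n s (i * s + j + 1), min (i * s + j + 1) n) := by
  by_cases hM : i * s + j < n
  · have hmin : min (i * s + j) n = i * s + j := by omega
    rw [hmin]
    simp only [if_pos hM, Prod.mk.injEq]
    refine ⟨?_, by omega⟩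
    rw [getD_cellG t n s _ i hi, set_map_range _ _ _ _]
    unfold cellG
    rw [set_map_range _ _ _ _]
    apply List.map_congr_left
    intro r hr
    rw [List.mem_range] at hr
    by_cases hri : r = i
    · subst hri
      simp only []
      apply List.map_congr_left
      intro c hc
      rw [List.mem_range] at hc
      by_cases hcj : c = j
      · subst hcj
        have : r * s + c < r * s + c + 1 ∧ r * s + c < n := by omega
        simp [this]
      · have hne : r * s + c ≠ r * s + j := by omega
        have : (r * s + c < r * s + j + 1 ∧ r * s + c < n) ↔ (r * s + c < r * s + j ∧ r * s + c < n) := by omega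
        rw [if_neg hcj]
        split_ifs with ha hb
        · rfl
        · omega
        · omega
        · rfl
    · simp only [if_neg hri]
      apply List.map_congr_left
      intro c hc
      rw [List.mem_range] at hc
      have hne : r * s + c ≠ i * s + j := fun h => hri (cell_inj hc hj h).1
      have : (r * s + c < i * s + j + 1 ∧ r * s + c < n) ↔ (r * s + c < i * s + j ∧ r * s + c < n) := by omega
      rw [if_congr this rfl rfl]
  · have hmin : min (i * s + j) n = n := by omega
    rw [hmin]
    simp only [if_neg (lt_irrefl n), Prod.mk.injEq]
    refine ⟨?_, by omega⟩
    unfold cellG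
    apply List.map_congr_left
    intro r hr
    apply List.map_congr_left
    intro c hc
    have : (r * s + c < i * s + j ∧ r * s + c < n) ↔ (r * s + c < i * s + j + 1 ∧ r * s + c < n) := by omega
    rw [if_congr this rfl rfl]

-- A's inner loop over row i, first j columns
theorem fill_inner (t : List Char) (n s i : Nat) (hi : i < s) (j : Nat) (hj : j ≤ s) :
    (List.range j).foldl (fun (st : List (List Char) × Nat) j' =>
        if st.2 < n then (st.1.set i (((st.1.getD i []).set j' (t.getD st.2 'X'))), st.2 + 1) else st)
      (cellG t n s (i * s), min (i * s) n)
    = (cellG t n s (i * s + j), min (i * s + j) n) := by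
  induction j with
  | zero => simp
  | succ j ih =>
      rw [List.range_succ, List.foldl_append, ih (by omega)]
      simp only [List.foldl_cons, List.foldl_nil]
      have := fill_step t n s i j hi (by omega)
      simp only [this]
      have h1 : i * s + (j + 1) = i * s + j + 1 := by omega
      rw [h1]

-- A's outer loop over the first i rows
theorem fill_outer (t : List Char) (n s : Nat) (i : Nat) (hi : i ≤ s) :
    (List.range i).foldl (fun (st : List (List Char) × Nat) r =>
        (List.range s).foldl (fun (st : List (List Char) × Nat) j' =>
          if st.2 < n then (st.1.set r (((st.1.getD r []).set j' (t.getD st.2 'X'))), st.2 + 1) else st) st)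
      (cellG t n s 0, min 0 n)
    = (cellG t n s (i * s), min (i * s) n) := by
  induction i with
  | zero => simp
  | succ i ih =>
      rw [List.range_succ, List.foldl_append, ih (by omega)]
      simp only [List.foldl_cons, List.foldl_nil]
      rw [fill_inner t n s i (by omega) s (le_refl s)]
      have h1 : i * s + s = (i + 1) * s := by ring
      rw [h1]

-- B appends one character to one bucket per step
theorem bktG_succ (t : List Char) (n s N d : Nat) :
    bktG t n s (N + 1) d = bktG t n s N d ++ (if N / s + N % s = d then [gVal t n N] else []) := by
  unfold bktG
  rw [List.range_succ, List.filter_append, List.map_append]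
  by_cases h : N / s + N % s = d <;> simp [h]

-- B's single pass over the first N positions
theorem bkt_fold (t : List Char) (n s : Nat) (hs : 0 < s) (N : Nat) (hN : N ≤ s * s) :
    (List.range N).foldl (fun (bs : List (List Char)) m =>
        bs.set (m / s + m % s) ((bs.getD (m / s + m % s) []) ++ [if m < n then t.getD m 'X' else 'X']))
      (List.replicate (2 * s - 1) [])
    = (List.range (2 * s - 1)).map (fun d => bktG t n s N d) := by
  induction N with
  | zero =>
      unfold bktG
      simp
  | succ N ih =>
      rw [List.range_succ, List.foldl_append, ih (by omega)]
      simp only [List.foldl_cons, List.foldl_nil]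
      have hdlt : N / s + N % s < 2 * s - 1 := by
        have h1 : N / s < s := Nat.div_lt_iff_lt_mul hs |>.mpr (by omega)
        have h2 : N % s < s := Nat.mod_lt _ hs
        omega
      rw [PySem.List.getD_map_range _ _ _ _ hdlt, set_map_range _ _ _ _]
      apply List.map_congr_left
      intro d hd
      rw [bktG_succ]
      by_cases h : d = N / s + N % s
      · subst h
        simp [gVal]
      · have h2 : ¬ (N / s + N % s = d) := fun hh => h hh.symm
        simp [h, h2]

-- the k-th anti-diagonal read from A's grid equals B's bucket k
theorem read_diag (t : List Char) (n s k : Nat) (hs : 0 < s) :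
    ((List.range s).filter (fun (i : Nat) => decide (0 ≤ (k : Int) - (i : Int) ∧ (k : Int) - (i : Int) < (s : Int)))).map
      (fun (i : Nat) => ((cellG t n s (s * s)).getD i []).getD ((k : Int) - (i : Int)).toNat 'X')
    = bktG t n s (s * s) k := by
  have hfc : ∀ i ∈ List.range s,
      (fun (i : Nat) => decide (0 ≤ (k : Int) - (i : Int) ∧ (k : Int) - (i : Int) < (s : Int))) i
        = decide (i ≤ k ∧ k - i < s) := by
    intro i _
    simp only [decide_eq_decide]
    omega
  rw [List.filter_congr hfc]
  have hmap : ∀ i ∈ (List.range s).filter (fun i => decide (i ≤ k ∧ k - i < s)),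
      ((cellG t n s (s * s)).getD i []).getD ((k : Int) - (i : Int)).toNat 'X'
        = gVal t n (i * s + (k - i)) := by
    intro i hi
    rw [List.mem_filter, List.mem_range] at hi
    obtain ⟨his, hk⟩ := hi
    rw [decide_eq_true_eq] at hk
    have ht : ((k : Int) - (i : Int)).toNat = k - i := by omega
    rw [ht, getD_cellG t n s _ i his, PySem.List.getD_map_range _ _ _ _ (by omega)]
    have hlt : i * s + (k - i) < s * s := cell_lt his (by omega)
    unfold gVal
    by_cases hgn : i * s + (k - i) < n
    · simp [hlt, hgn]
    · simp [hgn]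
  rw [List.map_congr_left hmap]
  unfold bktG
  rw [range_mul s s, List.filter_flatMap, List.map_flatMap,
      map_filter_eq_flatMap]
  apply List.flatMap_congr
  intro i hi
  rw [List.mem_range] at hi
  rw [List.filter_map]
  have hfc2 : ∀ j ∈ List.range s,
      ((fun m => decide (m / s + m % s = k)) ∘ (fun j => i * s + j)) j = decide (i + j = k) := by
    intro j hj
    rw [List.mem_range] at hj
    simp only [Function.comp]
    have h1 : (i * s + j) / s = i := by
      rw [Nat.mul_comm i s, Nat.mul_add_div hs, Nat.div_eq_of_lt hj]; omega
    have h2 : (i * s + j) % s = j := by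
      rw [Nat.add_comm, Nat.add_mul_mod_self_right, Nat.mod_eq_of_lt hj]
    rw [h1, h2]
  rw [List.filter_congr hfc2, filter_range_eq]
  by_cases h : i ≤ k ∧ k - i < s
  · simp [h]
  · simp [h]

-- ===== VERDICT (by name: the statement is the Claim_ definition above) =====
theorem diagonal_encrypt_spec : Claim_equal_diagonal_encrypt := by
  unfold Claim_equal_diagonal_encrypt
  intro text _
  unfold Spec_diagonal_encrypt diagonal_encrypt diagonal_encrypt_alt
  simp only []
  set t := pvClean text with ht
  set n := t.length with hn0
  set s := pvSize n 1 with hs0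
  have hs : 0 < s := pvSize_ge n 1
  have hn : n ≤ s * s := pvSize_sq n 1
  rw [show (0 : Nat) = min 0 n from (Nat.zero_min n).symm,
      show List.replicate s (List.replicate s 'X') = cellG t n s 0 from (cellG_zero t n s).symm,
      fill_outer t n s s (le_refl s)]
  rw [show min (s * s) n = n from by omega]
  have houter : (fun (acc : List Char) (k : Nat) =>
      (List.range s).foldl (fun (acc : List Char) (i : Nat) =>
        if 0 ≤ (k : Int) - (i : Int) ∧ (k : Int) - (i : Int) < (s : Int) then
          acc ++ [(((cellG t n s (s * s), n).1).getD i []).getD ((k : Int) - (i : Int)).toNat 'X']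
        else acc) acc)
      = (fun (acc : List Char) (k : Nat) => acc ++
          (((List.range s).filter (fun (i : Nat) => decide (0 ≤ (k : Int) - (i : Int) ∧ (k : Int) - (i : Int) < (s : Int)))).map
            (fun (i : Nat) => ((cellG t n s (s * s)).getD i []).getD ((k : Int) - (i : Int)).toNat 'X'))) := by
    funext acc k
    exact PySem.List.foldl_append_ite _ _ _ _
  rw [houter, PySem.List.foldl_append_eq_flatMap,
      bkt_fold t n s hs (s * s) (le_refl _), ← List.flatMap_def]
  rw [show 2 * s = (2 * s - 1) + 1 from by omega, List.range_succ, List.flatMap_append]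
  have hempty : (List.range s).filter (fun (i : Nat) =>
      decide (0 ≤ ((2 * s - 1 : Nat) : Int) - (i : Int) ∧ ((2 * s - 1 : Nat) : Int) - (i : Int) < (s : Int))) = [] := by
    rw [List.filter_eq_nil_iff]
    intro i hi
    rw [List.mem_range] at hi
    simp only [decide_eq_true_eq, not_and]
    intro _
    have hc : ((2 * s - 1 : Nat) : Int) = 2 * (s : Int) - 1 := by push_cast [Nat.cast_sub (by omega : 1 ≤ 2 * s)]; ring
    rw [hc]
    omega
  simp only [List.flatMap_cons, List.flatMap_nil, hempty, List.map_nil, List.append_nil,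
    List.nil_append]
  exact congrArg String.ofList (List.flatMap_congr (fun k _ => read_diag t n s k hs))
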